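-- pv_equiv track=rewrite | github.com/Pete-rePete/advent-of-code | aoc2019/day3.py | lay_down_wire_length
-- ===== SOURCE A (Python) =====
-- def parse_instruction(instr):
--     direction = instr[0]
--     distance = int(instr[1:])
--     return direction, distance
--
-- def lay_down_wire_length(pos, instr):
--     '''
--     coordinate system X,Y
--     U corresponds with positive Y
--     D negative Y
--     L negative X
--     R positive X
--
--     Arguments:
--         pos [tuple]: Position. XY coordinates
--         instr [str]: Instruction. e.g. "U12" means "up 12"
--
--     Returns
--         wire [list] list of coordinates where wire has been laid down
--         pos [tuple] (X,Y) coordinate of new position, at the end of the new wire length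
--     '''
--     drc, dist = parse_instruction(instr)
--     L = 1 if drc == 'L' else 0
--     R = 1 if drc == 'R' else 0
--     U = 1 if drc == 'U' else 0
--     D = 1 if drc == 'D' else 0
--     wire = []
--     for x in range(1,dist+1):
--         pos = (pos[0] - L + R, pos[1] + U - D)
--         wire.append(pos)
--     return wire, pos
-- ===== SOURCE B (Python) =====
-- def lay_down_wire_length(pos, instr):
--     # Different decomposition: compute the endpoint in closed form first, then
--     # lay the wire BACK-TO-FRONT by stepping backwards from the endpoint, and
--     # reverse once at the end.
--     drc = instr[0]
--     dist = int(instr[1:])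
--     dx = (drc == 'R') - (drc == 'L')
--     dy = (drc == 'U') - (drc == 'D')
--     if dist <= 0:
--         return [], pos
--     end = (pos[0] + dx * dist, pos[1] + dy * dist)
--     wire = []
--     p = end
--     for _ in range(dist):
--         wire.append(p)
--         p = (p[0] - dx, p[1] - dy)
--     wire.reverse()
--     return wire, end
-- ===== Notes on version B (the rewrite author's own statement) =====
-- stated objective: alternative
-- what changed: B computes the segment endpoint in closed form first, then builds the wire back-to-front by stepping backwards from that endpoint and reversing once, instead of A's forward per-step accumulation of loop-carried position state with four one-hot direction flags.
import Mathlib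
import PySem

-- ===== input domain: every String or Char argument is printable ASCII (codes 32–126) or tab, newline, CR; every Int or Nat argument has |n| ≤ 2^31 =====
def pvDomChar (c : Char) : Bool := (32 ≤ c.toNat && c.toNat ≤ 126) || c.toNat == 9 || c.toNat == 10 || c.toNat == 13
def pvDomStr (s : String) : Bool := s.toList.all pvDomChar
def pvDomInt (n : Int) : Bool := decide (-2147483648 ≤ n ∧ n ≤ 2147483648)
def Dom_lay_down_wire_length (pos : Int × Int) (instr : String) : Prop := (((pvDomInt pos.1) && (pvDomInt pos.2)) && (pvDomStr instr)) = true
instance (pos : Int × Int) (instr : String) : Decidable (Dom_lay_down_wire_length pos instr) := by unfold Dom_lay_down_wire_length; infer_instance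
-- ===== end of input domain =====

-- B computes the endpoint in closed form first, then lays the wire back-to-front from the
-- endpoint and reverses once, instead of A's forward per-step accumulation; objective: alternative.

-- ===== PORT A =====
-- parse_instruction: instr[0] raises IndexError on "", int(instr[1:]) raises ValueError;
-- both are `none` here and excluded by Pre_.
def parse_instruction (instr : String) : Option (Char × Int) :=
  match PySem.Str.pyGet? instr 0, PySem.Int.ofStr? (PySem.Str.slice instr (some 1) none) with
  | some c, some d => some (c, d)
  | _, _ => none

def lay_down_wire_length (pos : Int × Int) (instr : String) : (List (Int × Int)) × (Int × Int) :=
  match parse_instruction instr with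
  | none => ([], pos)   -- unreachable under Pre_ (Python raises here)
  | some (drc, dist) =>
    let L : Int := if drc = 'L' then 1 else 0
    let R : Int := if drc = 'R' then 1 else 0
    let U : Int := if drc = 'U' then 1 else 0
    let D : Int := if drc = 'D' then 1 else 0
    (PySem.List.pyRange 1 (dist + 1) 1).foldl
      (fun (st : List (Int × Int) × (Int × Int)) (_ : Int) =>
        let p := (st.2.1 - L + R, st.2.2 + U - D)
        (st.1 ++ [p], p))
      ([], pos)

-- ===== PORT B =====
def lay_down_wire_length_alt (pos : Int × Int) (instr : String) : (List (Int × Int)) × (Int × Int) :=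
  match PySem.Str.pyGet? instr 0, PySem.Int.ofStr? (PySem.Str.slice instr (some 1) none) with
  | some drc, some dist =>
    let dx : Int := (if drc = 'R' then 1 else 0) - (if drc = 'L' then 1 else 0)
    let dy : Int := (if drc = 'U' then 1 else 0) - (if drc = 'D' then 1 else 0)
    if dist ≤ 0 then ([], pos)
    else
      let endp : Int × Int := (pos.1 + dx * dist, pos.2 + dy * dist)
      let st := (PySem.List.pyRange 0 dist 1).foldl
        (fun (st : List (Int × Int) × (Int × Int)) (_ : Int) =>
          (st.1 ++ [st.2], (st.2.1 - dx, st.2.2 - dy)))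
        ([], endp)
      (st.1.reverse, endp)
  | _, _ => ([], pos)   -- unreachable under Pre_ (Python raises here)

-- ===== PRECONDITION & SPEC =====
-- Pre_: instr is nonempty and instr[1:] is a valid int literal — exactly where Python A returns.
def Pre_lay_down_wire_length (pos : Int × Int) (instr : String) : Prop :=
  (PySem.Str.pyGet? instr 0).isSome ∧
  (PySem.Int.ofStr? (PySem.Str.slice instr (some 1) none)).isSome
instance (pos : Int × Int) (instr : String) : Decidable (Pre_lay_down_wire_length pos instr) := by
  unfold Pre_lay_down_wire_length; infer_instance

def pvWitness_lay_down_wire_length : (Int × Int) × String := ((2, 3), "U3")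

def Spec_lay_down_wire_length (pos : Int × Int) (instr : String) (out : (List (Int × Int)) × (Int × Int)) : Prop := out = lay_down_wire_length_alt pos instr
instance (pos : Int × Int) (instr : String) (out : (List (Int × Int)) × (Int × Int)) : Decidable (Spec_lay_down_wire_length pos instr out) := by unfold Spec_lay_down_wire_length; infer_instance

-- ===== CLAIM (what is proved, stated in full; the proofs are below) =====
def Claim_equal_lay_down_wire_length : Prop := ∀ (pos : Int × Int) (instr : String), Dom_lay_down_wire_length pos instr → Pre_lay_down_wire_length pos instr → Spec_lay_down_wire_length pos instr (lay_down_wire_length pos instr)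

-- ===== LEMMAS AND PROOFS =====

-- A's forward accumulation fold equals the closed-form map from the base point
lemma fold_eq_closed (a b c d : Int) (p0 : Int × Int) (n : Nat) :
    ((PySem.List.pyRange 1 ((n : Int) + 1) 1).foldl
      (fun (st : List (Int × Int) × (Int × Int)) (_ : Int) =>
        ((st.1 ++ [(st.2.1 - a + b, st.2.2 + c - d)]), (st.2.1 - a + b, st.2.2 + c - d)))
      ([], p0))
    = ((PySem.List.pyRange 1 ((n : Int) + 1) 1).map
         (fun i => (p0.1 + (b - a) * i, p0.2 + (c - d) * i)),
       if n = 0 then p0 else (p0.1 + (b - a) * n, p0.2 + (c - d) * n)) := by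
  induction n with
  | zero => simp [PySem.List.pyRange_one_eq_nil]
  | succ m ih =>
    push_cast
    rw [PySem.List.pyRange_one_succ_right (by omega)]
    rw [List.foldl_append, List.map_append]
    push_cast at ih
    rw [ih]
    simp only [List.foldl_cons, List.foldl_nil, List.map_cons, List.map_nil]
    by_cases hm : m = 0
    · subst hm
      simp [Prod.ext_iff]
      exact ⟨by ring, by ring⟩
    · simp only [if_neg hm]
      simp [Prod.ext_iff]
      exact ⟨by ring, by ring⟩

-- B's backward accumulation fold equals the closed-form map counting DOWN from the endpoint
lemma fold_back (dx dy : Int) (e : Int × Int) (n : Nat) :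
    ((PySem.List.pyRange 0 (n : Int) 1).foldl
      (fun (st : List (Int × Int) × (Int × Int)) (_ : Int) =>
        (st.1 ++ [st.2], (st.2.1 - dx, st.2.2 - dy)))
      ([], e))
    = ((PySem.List.pyRange 0 (n : Int) 1).map
         (fun i => (e.1 - dx * i, e.2 - dy * i)),
       (e.1 - dx * n, e.2 - dy * n)) := by
  induction n with
  | zero => simp [PySem.List.pyRange_one_eq_nil]
  | succ m ih =>
    push_cast
    rw [PySem.List.pyRange_one_succ_right (by omega)]
    rw [List.foldl_append, List.map_append]
    push_cast at ih
    rw [ih]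
    simp only [List.foldl_cons, List.foldl_nil, List.map_cons, List.map_nil]
    simp [Prod.ext_iff]
    exact ⟨by ring, by ring⟩

-- reversing the countdown-from-endpoint wire gives the forward wire from the base point
lemma rev_back_eq_forward (dx dy : Int) (p : Int × Int) (n : Nat) :
    (((PySem.List.pyRange 0 (n : Int) 1).map
        (fun i => (p.1 + dx * n - dx * i, p.2 + dy * n - dy * i))).reverse)
    = (PySem.List.pyRange 1 ((n : Int) + 1) 1).map
        (fun i => (p.1 + dx * i, p.2 + dy * i)) := by
  apply List.ext_getElem
  · simp [PySem.List.length_pyRange_one]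
  · intro k h1 h2
    have hn : k < n := by
      simpa [PySem.List.length_pyRange_one] using h2
    have hlen : ((PySem.List.pyRange 0 (n : Int) 1).map
        (fun i => (p.1 + dx * n - dx * i, p.2 + dy * n - dy * i))).length = n := by
      simp [PySem.List.length_pyRange_one]
    rw [List.getElem_reverse]
    rw [List.getElem_map, List.getElem_map]
    rw [PySem.List.getElem_pyRange_one, PySem.List.getElem_pyRange_one]
    have : ((((PySem.List.pyRange 0 (n : Int) 1).map
        (fun i => (p.1 + dx * n - dx * i, p.2 + dy * n - dy * i))).length - 1 - k : Nat) : Int)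
        = (n : Int) - 1 - k := by
      rw [hlen]; omega
    rw [this]
    refine Prod.ext ?_ ?_ <;> (simp only []; ring)

theorem lay_down_wire_length_equal_aux (pos : Int × Int) (instr : String)
    (hp : Pre_lay_down_wire_length pos instr) :
    lay_down_wire_length pos instr = lay_down_wire_length_alt pos instr := by
  obtain ⟨h1, h2⟩ := hp
  obtain ⟨drc, hdrc⟩ := Option.isSome_iff_exists.mp h1
  obtain ⟨dist, hdist⟩ := Option.isSome_iff_exists.mp h2
  unfold lay_down_wire_length lay_down_wire_length_alt parse_instruction
  rw [hdrc, hdist]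
  simp only []
  by_cases hd : dist ≤ 0
  · rw [if_pos hd, PySem.List.pyRange_one_eq_nil (by omega)]
    simp
  · rw [if_neg hd]
    obtain ⟨n, rfl⟩ := Int.eq_ofNat_of_zero_le (by omega : (0:Int) ≤ dist)
    have hn : n ≠ 0 := by
      rintro rfl; exact hd (by simp)
    rw [fold_eq_closed, fold_back]
    simp only [if_neg hn]
    rw [rev_back_eq_forward]

-- ===== VERDICT (by name: the statement is the Claim_ definition above) =====
theorem lay_down_wire_length_spec : Claim_equal_lay_down_wire_length := by
  intro pos instr _ hp
  unfold Spec_lay_down_wire_length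
  exact lay_down_wire_length_equal_aux pos instr hp
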